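-- pv_equiv track=rewrite | github.com/pisterlabs/promptset | data/scraping/repos/griff4692~yarn/eval~clique.py | remove_non_ents_from_list
-- ===== SOURCE A (Python) =====
-- import string
--
-- def remove_non_ents_from_list(text, rel_spans, remove_title=True):
--     rel_spans_lower = [x.strip(string.punctuation).lower() for x in list(rel_spans)]
--     lines = text.split('\n')
--     new_lines = []
--     for line in lines:
--         if 'title:' in line.lower() and not remove_title:
--             new_lines.append(line)
--         elif '<doc-sep>' in line.lower() and not remove_title:
--             new_lines.append(line)
--         elif line == '':
--             new_lines.append(line)
--         elif any([x_lower in text.lower() for x_lower in rel_spans_lower]):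
--             new_lines.append(line)
--     return '\n'.join(new_lines)
-- ===== SOURCE B (Python) =====
-- import string
--
-- def remove_non_ents_from_list(text, rel_spans, remove_title=True):
--     # Hoist the loop-invariant entity test: A checks the WHOLE text (not the
--     # line) against every span for every line.  Compute it once; if any span
--     # occurs, every line is kept, so the original text comes back unchanged.
--     if any(span.strip(string.punctuation).lower() in text.lower() for span in rel_spans):
--         return text
--     # Otherwise only the structural rules decide which lines survive.
--     keep = lambda line: line == '' or (not remove_title and
--                                        ('title:' in line.lower() or '<doc-sep>' in line.lower()))
--     return '\n'.join(line for line in text.split('\n') if keep(line))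
-- ===== Notes on version B (the rewrite author's own statement) =====
-- stated objective: faster
-- what changed: The per-line any(span in text.lower()) test in A is loop-invariant, so B computes it once up front and returns the text unchanged when it holds (every line would be kept); only otherwise does B do a single filter pass using the structural rules, removing the per-line span scan entirely.
import Mathlib
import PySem

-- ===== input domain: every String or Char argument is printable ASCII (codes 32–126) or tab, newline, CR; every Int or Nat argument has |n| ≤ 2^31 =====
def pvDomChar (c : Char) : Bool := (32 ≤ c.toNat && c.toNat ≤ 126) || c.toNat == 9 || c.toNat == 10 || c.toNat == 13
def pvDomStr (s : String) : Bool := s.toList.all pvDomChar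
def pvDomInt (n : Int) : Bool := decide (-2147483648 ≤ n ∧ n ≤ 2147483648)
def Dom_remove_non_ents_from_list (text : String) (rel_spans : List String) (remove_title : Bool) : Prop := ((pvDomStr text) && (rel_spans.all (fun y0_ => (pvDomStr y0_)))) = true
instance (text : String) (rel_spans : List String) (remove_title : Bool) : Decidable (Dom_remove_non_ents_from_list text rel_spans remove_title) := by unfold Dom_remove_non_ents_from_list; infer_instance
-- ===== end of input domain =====

-- B hoists A's loop-invariant whole-text entity test out of the per-line loop:
-- computed once, it either returns the text unchanged or a single structural filter pass runs.


-- string.punctuation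
def pvPunct : List Char := "!\"#$%&'()*+,-./:;<=>?@[\\]^_`{|}~".toList

-- ===== PORT A =====
def remove_non_ents_from_list (text : String) (rel_spans : List String) (remove_title : Bool) : String :=
  let rel_spans_lower := rel_spans.map (fun x => PySem.Chars.lower (PySem.Chars.stripChars x.toList pvPunct))
  let lines := PySem.Chars.splitOn text.toList ['\n']
  let new_lines := lines.foldl (fun acc line =>
    if PySem.Chars.isIn "title:".toList (PySem.Chars.lower line) && !remove_title then acc ++ [line]
    else if PySem.Chars.isIn "<doc-sep>".toList (PySem.Chars.lower line) && !remove_title then acc ++ [line]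
    else if line == [] then acc ++ [line]
    else if rel_spans_lower.any (fun x_lower => PySem.Chars.isIn x_lower (PySem.Chars.lower text.toList)) then acc ++ [line]
    else acc) []
  String.ofList (PySem.Chars.join ['\n'] new_lines)

-- ===== PORT B =====
def remove_non_ents_from_list_alt (text : String) (rel_spans : List String) (remove_title : Bool) : String :=
  if rel_spans.any (fun span =>
       PySem.Chars.isIn (PySem.Chars.lower (PySem.Chars.stripChars span.toList pvPunct))
                        (PySem.Chars.lower text.toList)) then
    text
  else
    let keep := fun (line : List Char) =>
      line == [] || (!remove_title &&
        (PySem.Chars.isIn "title:".toList (PySem.Chars.lower line) ||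
         PySem.Chars.isIn "<doc-sep>".toList (PySem.Chars.lower line)))
    String.ofList (PySem.Chars.join ['\n'] ((PySem.Chars.splitOn text.toList ['\n']).filter keep))

-- ===== PRECONDITION & SPEC =====
def Spec_remove_non_ents_from_list (text : String) (rel_spans : List String) (remove_title : Bool) (out : String) : Prop := out = remove_non_ents_from_list_alt text rel_spans remove_title
instance (text : String) (rel_spans : List String) (remove_title : Bool) (out : String) : Decidable (Spec_remove_non_ents_from_list text rel_spans remove_title out) := by unfold Spec_remove_non_ents_from_list; infer_instance

-- ===== CLAIM (what is proved, stated in full; the proofs are below) =====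
def Claim_equal_remove_non_ents_from_list : Prop := ∀ (text : String) (rel_spans : List String) (remove_title : Bool), Dom_remove_non_ents_from_list text rel_spans remove_title → Spec_remove_non_ents_from_list text rel_spans remove_title (remove_non_ents_from_list text rel_spans remove_title)

-- ===== LEMMAS AND PROOFS =====

-- joining two final pieces with the separator in between = joining their concatenation through sep
lemma intercalate_snoc_two (sep a b : List Char) (ys : List (List Char)) :
    List.intercalate sep (ys ++ [a, b]) = List.intercalate sep (ys ++ [a ++ sep ++ b]) := by
  induction ys with
  | nil => simp [List.intercalate]
  | cons y ys ih =>
      rcases ys with _ | ⟨z, zs⟩ <;>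
        simp_all [List.intercalate, List.intersperse]

-- splitOn.go invariant: intercalating the result re-assembles acc, cur and the rest of the input
lemma go_intercalate (sep : List Char) (hsep : sep ≠ []) :
    ∀ (fuel : Nat) (l cur : List Char) (acc : List (List Char)), l.length < fuel →
    List.intercalate sep (PySem.Chars.splitOn.go sep fuel l cur acc) =
    List.intercalate sep (acc.reverse ++ [cur.reverse ++ l]) := by
  intro fuel
  induction fuel with
  | zero => intro l cur acc h; omega
  | succ fuel ih =>
      intro l cur acc h
      match l with
      | [] =>
          simp [PySem.Chars.splitOn.go]
      | c :: rest =>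
          rw [PySem.Chars.splitOn.go]
          by_cases hp : sep.isPrefixOf (c :: rest) = true
          · rw [if_pos hp]
            have hpre : sep <+: (c :: rest) := List.isPrefixOf_iff_prefix.mp hp
            obtain ⟨t, ht⟩ := hpre
            have hsl : 0 < sep.length := List.length_pos_iff.mpr hsep
            have hdrop : (c :: rest).drop sep.length = t := by
              rw [← ht, List.drop_left]
            have hlenht : sep.length + t.length = rest.length + 1 := by
              have := congrArg List.length ht
              simpa using this
            have hlen : ((c :: rest).drop sep.length).length < fuel := by
              rw [hdrop]
              simp at h
              omega
            rw [ih _ [] _ hlen, hdrop]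
            simp only [List.reverse_nil, List.nil_append]
            have hstep : ((cur.reverse :: acc).reverse ++ [t])
                 = acc.reverse ++ [cur.reverse, t] := by simp
            rw [hstep, intercalate_snoc_two]
            rw [← ht]
            simp
          · rw [if_neg hp]
            have hlen : rest.length < fuel := by
              simp at h; omega
            rw [ih _ (c :: cur) _ hlen]
            simp

-- '\n'.join(text.split('\n')) == text
lemma join_splitOn_nl (s : List Char) :
    PySem.Chars.join ['\n'] (PySem.Chars.splitOn s ['\n']) = s := by
  unfold PySem.Chars.splitOn PySem.Chars.join
  rw [go_intercalate ['\n'] (by simp) (s.length + 1) s [] [] (by omega)]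
  simp [List.intercalate]

-- ===== VERDICT (by name: the statement is the Claim_ definition above) =====
theorem remove_non_ents_from_list_spec : Claim_equal_remove_non_ents_from_list := by
  intro text rel_spans remove_title _
  unfold Spec_remove_non_ents_from_list remove_non_ents_from_list remove_non_ents_from_list_alt
  simp only [List.any_map, Function.comp_def]
  set ka := rel_spans.any (fun span =>
      PySem.Chars.isIn (PySem.Chars.lower (PySem.Chars.stripChars span.toList pvPunct))
                       (PySem.Chars.lower text.toList)) with hka
  have hfold :
      (fun (acc : List (List Char)) (line : List Char) =>
        if PySem.Chars.isIn "title:".toList (PySem.Chars.lower line) && !remove_title then acc ++ [line]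
        else if PySem.Chars.isIn "<doc-sep>".toList (PySem.Chars.lower line) && !remove_title then acc ++ [line]
        else if line == [] then acc ++ [line]
        else if ka then acc ++ [line]
        else acc)
    = (fun acc line =>
        if (PySem.Chars.isIn "title:".toList (PySem.Chars.lower line) && !remove_title
            || PySem.Chars.isIn "<doc-sep>".toList (PySem.Chars.lower line) && !remove_title
            || line == [] || ka) then acc ++ [line] else acc) := by
    funext acc line
    cases h1 : PySem.Chars.isIn "title:".toList (PySem.Chars.lower line) <;>
      cases h2 : PySem.Chars.isIn "<doc-sep>".toList (PySem.Chars.lower line) <;>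
        cases h3 : (line == []) <;> cases remove_title <;> cases ka <;> simp
  rw [hfold, PySem.List.foldl_append_if_eq_filter, List.nil_append]
  by_cases hk : ka = true
  · rw [if_pos hk, hk]
    simp only [Bool.or_true, List.filter_true]
    rw [join_splitOn_nl]
    exact String.ofList_toList
  · rw [if_neg hk]
    have hk' : ka = false := by revert hk; cases ka <;> simp
    rw [hk']
    congr 1
    apply congrArg
    apply List.filter_congr
    intro line _
    cases h1 : PySem.Chars.isIn "title:".toList (PySem.Chars.lower line) <;>
      cases h2 : PySem.Chars.isIn "<doc-sep>".toList (PySem.Chars.lower line) <;>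
        cases h3 : (line == []) <;> cases remove_title <;> simp
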